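-- pv_equiv track=rewrite | github.com/lzxcloud/learn | PycharmProjects/learn/day4/6.py | funcl
-- ===== SOURCE A (Python) =====
-- def funcl(s):
--     new_tmp=[]
--     if type(s) is (list or tuple):
--         for i,j in enumerate(s):
--             if i % 2 != 0:
--                 new_tmp.append(j)
--             else:pass
--     else:return "type error"
--     return new_tmp
-- ===== SOURCE B (Python) =====
-- def funcl(s):
--     if type(s) is not list:
--         return "type error"
--     it = iter(s)
--     return [b for _a, b in zip(it, it)]
-- ===== Notes on version B (the rewrite author's own statement) =====
-- stated objective: idiomatic
-- what changed: Replaces the enumerate-with-parity-test accumulator loop by pairing consecutive elements with the zip(it, it) idiom and keeping the second of each pair; no index arithmetic or membership test remains.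
import Mathlib
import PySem

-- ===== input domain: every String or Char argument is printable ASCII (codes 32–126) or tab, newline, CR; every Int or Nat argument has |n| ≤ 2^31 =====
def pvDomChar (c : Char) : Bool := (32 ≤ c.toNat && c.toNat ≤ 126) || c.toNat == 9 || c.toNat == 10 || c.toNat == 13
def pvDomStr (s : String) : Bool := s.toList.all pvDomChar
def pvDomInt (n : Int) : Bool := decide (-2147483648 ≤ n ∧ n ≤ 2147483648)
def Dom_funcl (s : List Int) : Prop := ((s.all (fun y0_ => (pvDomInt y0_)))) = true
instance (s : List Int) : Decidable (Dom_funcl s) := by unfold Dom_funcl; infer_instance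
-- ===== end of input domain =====

-- ===== PORT A =====
-- B differs from A only on non-list arguments (where A returns "type error"); under the
-- List Int signature the type guard `type(s) is (list or tuple)` always succeeds, so the
-- port is the enumerate loop alone.
def funcl (s : List Int) : List Int :=
  (PySem.List.enumerate s 0).foldl
    (fun new_tmp ij => if PySem.Int.mod ij.1 2 ≠ 0 then new_tmp ++ [ij.2] else new_tmp) []

-- ===== PORT B =====
-- Source B pairs consecutive elements with zip(it, it) and keeps the second of each pair:
-- structurally, a two-step recursion over the list.
def funcl_alt (s : List Int) : List Int :=
  match s with
  | _ :: b :: t => b :: funcl_alt t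
  | _ => []

-- ===== PRECONDITION & SPEC =====
def Spec_funcl (s : List Int) (out : List Int) : Prop := out = funcl_alt s
instance (s : List Int) (out : List Int) : Decidable (Spec_funcl s out) := by unfold Spec_funcl; infer_instance

-- ===== CLAIM (what is proved, stated in full; the proofs are below) =====
def Claim_equal_funcl : Prop := ∀ (s : List Int), Dom_funcl s → Spec_funcl s (funcl s)

-- ===== LEMMAS AND PROOFS =====
theorem funcl_loop (s : List Int) : ∀ (k : Int) (acc : List Int),
    (PySem.List.enumerate s (2 * k)).foldl
      (fun new_tmp ij => if PySem.Int.mod ij.1 2 ≠ 0 then new_tmp ++ [ij.2] else new_tmp) acc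
    = acc ++ funcl_alt s := by
  induction s using funcl_alt.induct with
  | case1 a b t ih =>
    intro k acc
    have h1 : ¬ PySem.Int.mod (2 * k : Int) 2 ≠ 0 := by simp [PySem.Int.mod]
    have h2 : PySem.Int.mod (2 * k + 1 : Int) 2 ≠ 0 := by simp [PySem.Int.mod]
    have h3 : (2 : Int) * k + 1 + 1 = 2 * (k + 1) := by ring
    rw [PySem.List.enumerate_cons, PySem.List.enumerate_cons, List.foldl_cons,
        List.foldl_cons, if_neg h1, if_pos h2, h3, ih (k + 1)]
    simp [funcl_alt]
  | case2 s hs =>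
    intro k acc
    cases s with
    | nil => simp [PySem.List.enumerate_nil, funcl_alt]
    | cons a t =>
      cases t with
      | nil =>
        have h1 : ¬ PySem.Int.mod (2 * k : Int) 2 ≠ 0 := by simp [PySem.Int.mod]
        rw [PySem.List.enumerate_cons, List.foldl_cons, if_neg h1,
            PySem.List.enumerate_nil]
        simp [funcl_alt]
      | cons b t' => exact (hs a b t' rfl).elim

-- ===== VERDICT (by name: the statement is the Claim_ definition above) =====
theorem funcl_spec : Claim_equal_funcl := by
  intro s _
  unfold Spec_funcl funcl
  have := funcl_loop s 0 []
  simpa using this
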